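-- pv_equiv track=rewrite | github.com/ryancocuzzo/take-home-2026 | backend/taxonomy/prefilter.py | _fallback_categories
-- ===== SOURCE A (Python) =====
-- def _fallback_categories(categories: tuple[str, ...], top_k: int) -> list[str]:
--     """
--     Return a broad spread of categories when BM25 scoring finds no match.
--
--     This happens when the query has zero vocabulary overlap with every category label.
--     Rather than returning nothing (which would give the LLM nothing to work with),
--     we return a diverse sample by preferring top-level taxonomy segments first.
--
--     Strategy:
--       Pass 1 — collect the first segment of each category path (e.g. "Software Development"
--                from "Software Development > Backend"). One per unique top-level segment,
--                to maximise breadth. Stop once we reach top_k.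
--       Pass 2 — if we still need more, fill remaining slots with full category paths
--                that weren't already included.
--
--     Example (top_k=3, categories include many "Software Development > *" entries):
--         Pass 1 yields: ["Software Development", "Marketing", "Design"]
--         (three different top-level segments, not three sub-paths of the same one)
--     """
--     if top_k <= 0:
--         return []
--
--     ordered: list[str] = []
--     seen: set[str] = set()
--
--     # Pass 1: one representative per top-level taxonomy segment
--     for category in categories:
--         segment = category.split(" > ", 1)[0]
--         if segment in seen:
--             continue
--         ordered.append(segment)
--         seen.add(segment)
--         if len(ordered) >= top_k:
--             return ordered
--
--     # Pass 2: fill remaining slots with full category paths not yet covered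
--     for category in categories:
--         if category in seen:
--             continue
--         ordered.append(category)
--         seen.add(category)
--         if len(ordered) >= top_k:
--             break
--
--     return ordered
-- ===== SOURCE B (Python) =====
-- def _fallback_categories(categories, top_k):
--     """Alternative: rank every candidate (top-level segments before full paths,
--     earliest occurrence first) in one dict pass, then sort by rank and take top_k."""
--     if top_k <= 0:
--         return []
--     n = len(categories)
--     rank = {}
--     for i, c in enumerate(categories):
--         seg = c.split(" > ", 1)[0]
--         if i < rank.get(seg, 2 * n):
--             rank[seg] = i
--         if c not in rank:
--             rank[c] = n + i
--     return sorted(rank, key=rank.get)[:top_k]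
-- ===== Notes on version B (the rewrite author's own statement) =====
-- stated objective: alternative
-- what changed: Replaces A's two sequential early-stopping dedup scans with a rank-and-sort algorithm: one pass builds a dict assigning every candidate a numeric priority (top-level segments get their earliest index, full paths get n + index, segment status always wins), then the candidates are sorted by that priority and sliced to top_k.
import Mathlib
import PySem

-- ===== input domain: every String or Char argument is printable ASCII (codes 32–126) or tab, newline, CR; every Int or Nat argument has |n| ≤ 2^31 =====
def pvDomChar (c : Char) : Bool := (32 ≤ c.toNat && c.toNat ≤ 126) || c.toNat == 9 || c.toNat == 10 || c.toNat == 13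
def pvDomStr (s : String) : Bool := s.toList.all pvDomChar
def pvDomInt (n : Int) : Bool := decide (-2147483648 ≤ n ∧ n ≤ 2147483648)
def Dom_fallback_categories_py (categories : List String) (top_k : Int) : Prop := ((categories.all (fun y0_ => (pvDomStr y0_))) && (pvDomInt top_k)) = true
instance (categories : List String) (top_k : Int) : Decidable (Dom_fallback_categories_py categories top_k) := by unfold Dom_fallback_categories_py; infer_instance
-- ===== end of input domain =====

-- B replaces A's two sequential early-stopping scans by a rank-and-sort algorithm: one pass
-- assigns each candidate (segment or full path) a numeric priority, then sorts by it; objective: alternative.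

-- ===== PORT A =====
-- category.split(" > ", 1)[0]; the separator is nonempty so splitMax? is some nonempty list
-- and the getD/headD defaults are unreachable.
def pvSegOf (c : String) : String :=
  ((PySem.Str.splitMax? c " > " 1).getD [c]).headD c

-- Pass 1 of A: returns (ordered, seen, reached-top_k flag)
def pvPass1 : List String → List String → PySem.Set String → Int → (List String × PySem.Set String × Bool)
  | [], ordered, seen, _ => (ordered, seen, false)
  | c :: rest, ordered, seen, top_k =>
    let segment := pvSegOf c
    if PySem.Set.contains seen segment then pvPass1 rest ordered seen top_k
    else
      let ordered' := ordered ++ [segment]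
      let seen' := PySem.Set.add seen segment
      if top_k ≤ (ordered'.length : Int) then (ordered', seen', true)
      else pvPass1 rest ordered' seen' top_k

-- Pass 2 of A: fill remaining slots, break once len(ordered) >= top_k
def pvPass2 : List String → List String → PySem.Set String → Int → List String
  | [], ordered, _, _ => ordered
  | c :: rest, ordered, seen, top_k =>
    if PySem.Set.contains seen c then pvPass2 rest ordered seen top_k
    else
      let ordered' := ordered ++ [c]
      let seen' := PySem.Set.add seen c
      if top_k ≤ (ordered'.length : Int) then ordered'
      else pvPass2 rest ordered' seen' top_k

def fallback_categories_py (categories : List String) (top_k : Int) : List String :=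
  if top_k ≤ 0 then []
  else
    match pvPass1 categories [] PySem.Set.empty top_k with
    | (ordered, _, true) => ordered
    | (ordered, seen, false) => pvPass2 categories ordered seen top_k

-- ===== PORT B =====
-- one step of B's ranking loop: 'if i < rank.get(seg, 2*n): rank[seg] = i' then
-- 'if c not in rank: rank[c] = n + i'
def pvRankStep (n : Int) (d : PySem.Dict String Int) (ic : Int × String) : PySem.Dict String Int :=
  let seg := pvSegOf ic.2
  let d1 := if ic.1 < PySem.Dict.getD d seg (2 * n) then PySem.Dict.insert d seg ic.1 else d
  if PySem.Dict.contains d1 ic.2 then d1 else PySem.Dict.insert d1 ic.2 (n + ic.1)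

def fallback_categories_py_alt (categories : List String) (top_k : Int) : List String :=
  if top_k ≤ 0 then []
  else
    let n : Int := categories.length
    let rank := (PySem.List.enumerate categories).foldl (pvRankStep n) PySem.Dict.empty
    PySem.List.slice
      (PySem.List.sorted (PySem.Dict.keys rank) (fun k => PySem.Dict.getD rank k 0))
      none (some top_k)

-- ===== PRECONDITION & SPEC =====
def Spec_fallback_categories_py (categories : List String) (top_k : Int) (out : List String) : Prop := out = fallback_categories_py_alt categories top_k
instance (categories : List String) (top_k : Int) (out : List String) : Decidable (Spec_fallback_categories_py categories top_k out) := by unfold Spec_fallback_categories_py; infer_instance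

-- ===== CLAIM (what is proved, stated in full; the proofs are below) =====
def Claim_equal_fallback_categories_py : Prop := ∀ (categories : List String) (top_k : Int), Dom_fallback_categories_py categories top_k → Spec_fallback_categories_py categories top_k (fallback_categories_py categories top_k)

-- ===== LEMMAS AND PROOFS =====

-- Set.add to an unseen element just appends
theorem pv_add_eq_append (s : PySem.Set String) (x : String)
    (h : PySem.Set.contains s x = false) : PySem.Set.add s x = s ++ [x] := by
  simp only [PySem.Set.add, h, Bool.false_eq_true, if_false]

-- Set.update only appends: s is a prefix
theorem pv_update_exists_append (s : PySem.Set String) (l : List String) :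
    ∃ t, PySem.Set.update s l = s ++ t := by
  exact ⟨_, PySem.Set.update_eq_append_filter s l⟩

-- Characterisation of A's pass 1 when ordered = seen (they evolve in lock step)
theorem pv_pass1_spec (top_k : Int) :
    ∀ (l : List String) (s : List String), (s.length : Int) < top_k →
      pvPass1 l s s top_k =
        (if top_k ≤ ((PySem.Set.update s (l.map pvSegOf)).length : Int)
         then ((PySem.Set.update s (l.map pvSegOf)).take top_k.toNat,
               (PySem.Set.update s (l.map pvSegOf)).take top_k.toNat, true)
         else (PySem.Set.update s (l.map pvSegOf),
               PySem.Set.update s (l.map pvSegOf), false)) := by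
  intro l
  induction l with
  | nil =>
    intro s hs
    simp [pvPass1, PySem.Set.update_nil]
    omega
  | cons c rest ih =>
    intro s hs
    by_cases hc : PySem.Set.contains s (pvSegOf c) = true
    · have : PySem.Set.add s (pvSegOf c) = s := by
        simp only [PySem.Set.add, hc, if_true]
      simp only [pvPass1, hc, if_true, List.map_cons, PySem.Set.update_cons, this]
      exact ih s hs
    · have hc' : PySem.Set.contains s (pvSegOf c) = false := by
        revert hc; cases PySem.Set.contains s (pvSegOf c) <;> simp
      have hadd : PySem.Set.add s (pvSegOf c) = s ++ [pvSegOf c] :=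
        pv_add_eq_append s _ hc'
      simp only [pvPass1, hc', Bool.false_eq_true, if_false, List.map_cons,
        PySem.Set.update_cons, hadd]
      by_cases hk : top_k ≤ ((s ++ [pvSegOf c]).length : Int)
      · have hlen : (s ++ [pvSegOf c]).length = top_k.toNat := by
          simp only [List.length_append, List.length_cons, List.length_nil] at hk ⊢
          omega
        obtain ⟨t, ht⟩ := pv_update_exists_append (s ++ [pvSegOf c]) (rest.map pvSegOf)
        have hlen2 : top_k ≤ (((PySem.Set.update (s ++ [pvSegOf c]) (rest.map pvSegOf))).length : Int) := by
          rw [ht, List.length_append, hlen]; omega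
        have htake : (PySem.Set.update (s ++ [pvSegOf c]) (rest.map pvSegOf)).take top_k.toNat
            = s ++ [pvSegOf c] := by
          rw [ht, ← hlen, List.take_left]
        rw [if_pos hk, if_pos hlen2, htake]
      · have := ih (s ++ [pvSegOf c]) (by omega)
        simp only [hk, if_false]
        exact this

-- Characterisation of A's pass 2 when ordered = seen
theorem pv_pass2_spec (top_k : Int) :
    ∀ (l : List String) (s : List String), (s.length : Int) < top_k →
      pvPass2 l s s top_k =
        (if top_k ≤ ((PySem.Set.update s l).length : Int)
         then (PySem.Set.update s l).take top_k.toNat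
         else PySem.Set.update s l) := by
  intro l
  induction l with
  | nil =>
    intro s hs
    simp [pvPass2, PySem.Set.update_nil]
    omega
  | cons c rest ih =>
    intro s hs
    by_cases hc : PySem.Set.contains s c = true
    · have : PySem.Set.add s c = s := by simp only [PySem.Set.add, hc, if_true]
      simp only [pvPass2, hc, if_true, PySem.Set.update_cons, this]
      exact ih s hs
    · have hc' : PySem.Set.contains s c = false := by
        revert hc; cases PySem.Set.contains s c <;> simp
      have hadd : PySem.Set.add s c = s ++ [c] := pv_add_eq_append s _ hc'
      simp only [pvPass2, hc', Bool.false_eq_true, if_false, PySem.Set.update_cons, hadd]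
      by_cases hk : top_k ≤ ((s ++ [c]).length : Int)
      · have hlen : (s ++ [c]).length = top_k.toNat := by
          simp only [List.length_append, List.length_cons, List.length_nil] at hk ⊢
          omega
        obtain ⟨t, ht⟩ := pv_update_exists_append (s ++ [c]) rest
        have hlen2 : top_k ≤ (((PySem.Set.update (s ++ [c]) rest)).length : Int) := by
          rw [ht, List.length_append, hlen]; omega
        have htake : (PySem.Set.update (s ++ [c]) rest).take top_k.toNat = s ++ [c] := by
          rw [ht, ← hlen, List.take_left]
        rw [if_pos hk, if_pos hlen2, htake]
      · have := ih (s ++ [c]) (by omega)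
        simp only [hk, if_false]
        exact this

-- A, for positive top_k, returns the first top_k of dedup(segments ++ categories)
theorem pv_A_char (categories : List String) (top_k : Int) (hk : 0 < top_k) :
    fallback_categories_py categories top_k =
      (PySem.List.dedup (categories.map pvSegOf ++ categories)).take top_k.toNat := by
  have h0 : ¬ top_k ≤ 0 := by omega
  unfold fallback_categories_py
  simp only [h0, if_false]
  rw [PySem.List.dedup_eq_ofList, PySem.Set.ofList_append]
  have hempty : (PySem.Set.empty : PySem.Set String) = ([] : List String) := rfl
  rw [hempty, pv_pass1_spec top_k categories [] (by simpa using hk)]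
  rw [PySem.Set.update_nil_left]
  by_cases h1 : top_k ≤ ((PySem.Set.ofList (categories.map pvSegOf)).length : Int)
  · simp only [h1, if_true]
    obtain ⟨t, ht⟩ := pv_update_exists_append (PySem.Set.ofList (categories.map pvSegOf)) categories
    rw [ht, List.take_append_of_le_length]
    omega
  · simp only [h1, if_false]
    rw [pv_pass2_spec top_k categories (PySem.Set.ofList (categories.map pvSegOf)) (by omega)]
    split_ifs with h2
    · rfl
    · exact (List.take_of_length_le (by omega)).symm

-- the value B's rank dict holds at x after processing the first m categories
def pvSpec (categories : List String) (m : Nat) (x : String) : Option Int :=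
  if x ∈ (categories.map pvSegOf).take m then some (((categories.map pvSegOf).idxOf x : Int))
  else if x ∈ categories.take m then some ((categories.length : Int) + (categories.idxOf x : Int))
  else none

-- loop invariant of B's ranking pass
def pvInv (categories : List String) (m : Nat) (d : PySem.Dict String Int) : Prop :=
  d.keys.Nodup ∧ ∀ x, d.get? x = pvSpec categories m x

theorem pv_mem_take_idxOf_lt (l : List String) (m : Nat) (x : String) (h : x ∈ l.take m) :
    l.idxOf x < m := by
  have h2 : (l.take m).idxOf x < (l.take m).length := List.idxOf_lt_length_of_mem h
  have h3 : l.idxOf x ≤ (l.take m).idxOf x := by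
    conv_lhs => rw [← List.take_append_drop m l]
    rw [List.idxOf_append_of_mem h]
  have := List.length_take_le m l
  omega

theorem pv_idxOf_eq_of_fresh (l : List String) (m : Nat) (x : String) (hm : m < l.length)
    (hx : l[m] = x) (hnot : x ∉ l.take m) : l.idxOf x = m := by
  conv_lhs => rw [← List.take_append_drop m l]
  rw [List.idxOf_append_of_notMem hnot]
  have hd : l.drop m = x :: l.drop (m + 1) := by
    rw [List.drop_eq_getElem_cons hm, hx]
  rw [hd, List.idxOf_cons_self, List.length_take]
  omega

theorem pv_inv_zero (categories : List String) : pvInv categories 0 PySem.Dict.empty := by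
  refine ⟨by simp [pysem], fun x => ?_⟩
  simp [pvSpec, PySem.Dict.get?_empty]

-- one step of the loop preserves the invariant
theorem pv_inv_step (categories : List String) (m : Nat) (d : PySem.Dict String Int)
    (hm : m < categories.length) (hinv : pvInv categories m d) :
    pvInv categories (m + 1) (pvRankStep (categories.length : Int) d ((m : Int), categories[m])) := by
  obtain ⟨hnd, hget⟩ := hinv
  have hmseg : m < (categories.map pvSegOf).length := by simpa using hm
  have hsegm : (categories.map pvSegOf)[m]'hmseg = pvSegOf categories[m] := by
    simp
  have htb : (categories.map pvSegOf).take (m + 1) =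
      (categories.map pvSegOf).take m ++ [pvSegOf categories[m]] := by
    rw [List.take_add_one, List.getElem?_eq_getElem hmseg, hsegm]
    rfl
  have htc : categories.take (m + 1) = categories.take m ++ [categories[m]] := by
    rw [List.take_add_one, List.getElem?_eq_getElem hm]
    rfl
  simp only [pvRankStep]
  set s := pvSegOf categories[m] with hs_def
  set c := categories[m] with hc_def
  -- stage 1: the segment update
  have stage1 : ∃ d1 : PySem.Dict String Int,
      (if (m : Int) < PySem.Dict.getD d s (2 * (categories.length : Int))
        then PySem.Dict.insert d s (m : Int) else d) = d1 ∧
      d1.keys.Nodup ∧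
      ∀ x, d1.get? x =
        (if x ∈ (categories.map pvSegOf).take (m + 1)
          then some (((categories.map pvSegOf).idxOf x : Int))
          else if x ∈ categories.take m
          then some ((categories.length : Int) + (categories.idxOf x : Int))
          else none) := by
    by_cases hs : s ∈ (categories.map pvSegOf).take m
    · have hidx : (categories.map pvSegOf).idxOf s < m := pv_mem_take_idxOf_lt _ _ _ hs
      have hgd : PySem.Dict.getD d s (2 * (categories.length : Int)) =
          (((categories.map pvSegOf).idxOf s : Nat) : Int) := by
        rw [PySem.Dict.getD_eq_get?_getD, hget s]
        simp [pvSpec, hs]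
      refine ⟨d, ?_, hnd, ?_⟩
      · rw [hgd, if_neg (by exact_mod_cast Nat.not_lt.mpr (le_of_lt hidx))]
      · intro x
        rw [hget x]
        by_cases hx : x ∈ (categories.map pvSegOf).take m
        · have hx1 : x ∈ (categories.map pvSegOf).take (m + 1) := by
            rw [htb]; exact List.mem_append_left _ hx
          simp [pvSpec, hx, hx1]
        · have hx1 : x ∉ (categories.map pvSegOf).take (m + 1) := by
            rw [htb]
            intro hmem
            rcases List.mem_append.mp hmem with h | h
            · exact hx h
            · simp at h; subst h; exact hx hs
          simp [pvSpec, hx, hx1]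
    · have hcond : (m : Int) < PySem.Dict.getD d s (2 * (categories.length : Int)) := by
        by_cases hsc : s ∈ categories.take m
        · have : PySem.Dict.getD d s (2 * (categories.length : Int)) =
              (categories.length : Int) + (categories.idxOf s : Int) := by
            rw [PySem.Dict.getD_eq_get?_getD, hget s]
            simp [pvSpec, hs, hsc]
          rw [this]
          have : (0 : Int) ≤ (categories.idxOf s : Int) := by positivity
          omega
        · have : PySem.Dict.getD d s (2 * (categories.length : Int)) =
              2 * (categories.length : Int) := by
            rw [PySem.Dict.getD_eq_get?_getD, hget s]
            simp [pvSpec, hs, hsc]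
          rw [this]
          omega
      have hidxs : (categories.map pvSegOf).idxOf s = m :=
        pv_idxOf_eq_of_fresh _ m s hmseg hsegm hs
      refine ⟨PySem.Dict.insert d s (m : Int), by rw [if_pos hcond], PySem.Dict.nodup_keys_insert d s _ hnd, ?_⟩
      intro x
      rw [PySem.Dict.get?_insert]
      by_cases hx : x = s
      · have hx1 : s ∈ (categories.map pvSegOf).take (m + 1) := by
          rw [htb]; exact List.mem_append_right _ (by simp)
        simp [hx, hx1, hidxs]
      · rw [if_neg hx, hget x]
        by_cases hx0 : x ∈ (categories.map pvSegOf).take m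
        · have hx1 : x ∈ (categories.map pvSegOf).take (m + 1) := by
            rw [htb]; exact List.mem_append_left _ hx0
          simp [pvSpec, hx0, hx1]
        · have hx1 : x ∉ (categories.map pvSegOf).take (m + 1) := by
            rw [htb]
            intro hmem
            rcases List.mem_append.mp hmem with h | h
            · exact hx0 h
            · simp at h; exact hx h
          simp [pvSpec, hx0, hx1]
  obtain ⟨d1, hd1eq, hd1nd, hd1get⟩ := stage1
  rw [hd1eq]
  -- stage 2: the full-path update
  by_cases hc2 : PySem.Dict.contains d1 c = true
  · rw [if_pos hc2]
    have hcmem : c ∈ (categories.map pvSegOf).take (m + 1) ∨ c ∈ categories.take m := by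
      have h1 : c ∈ d1.keys := (PySem.Dict.contains_iff_mem_keys d1 c).mp hc2
      by_contra hneg
      push Not at hneg
      have := hd1get c
      rw [if_neg hneg.1, if_neg hneg.2] at this
      exact ((PySem.Dict.get?_eq_none_iff_not_mem_keys d1 c).mp this) h1
    refine ⟨hd1nd, fun x => ?_⟩
    rw [hd1get x]
    by_cases hx1 : x ∈ (categories.map pvSegOf).take (m + 1)
    · simp [pvSpec, hx1]
    · by_cases hx2 : x ∈ categories.take m
      · have hx3 : x ∈ categories.take (m + 1) := by
          rw [htc]; exact List.mem_append_left _ hx2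
        simp [pvSpec, hx1, hx2, hx3]
      · have hx3 : x ∉ categories.take (m + 1) := by
          rw [htc]
          intro hmem
          rcases List.mem_append.mp hmem with h | h
          · exact hx2 h
          · simp at h; subst h
            rcases hcmem with h | h
            · exact hx1 h
            · exact hx2 h
        simp [pvSpec, hx1, hx2, hx3]
  · rw [if_neg hc2]
    have hcnone : d1.get? c = none := by
      rw [PySem.Dict.get?_eq_none_iff_not_mem_keys]
      intro hmem
      exact hc2 ((PySem.Dict.contains_iff_mem_keys d1 c).mpr hmem)
    have hcs : c ∉ (categories.map pvSegOf).take (m + 1) ∧ c ∉ categories.take m := by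
      have := hd1get c
      rw [hcnone] at this
      constructor
      · intro h; rw [if_pos h] at this; simp at this
      · intro h
        by_cases h1 : c ∈ (categories.map pvSegOf).take (m + 1)
        · rw [if_pos h1] at this; simp at this
        · rw [if_neg h1, if_pos h] at this; simp at this
    have hidxc : categories.idxOf c = m :=
      pv_idxOf_eq_of_fresh _ m c hm rfl hcs.2
    refine ⟨PySem.Dict.nodup_keys_insert d1 c _ hd1nd, fun x => ?_⟩
    rw [PySem.Dict.get?_insert]
    by_cases hx : x = c
    · have hx3 : c ∈ categories.take (m + 1) := by
        rw [htc]; exact List.mem_append_right _ (by simp)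
      simp [pvSpec, hx, hcs.1, hx3, hidxc]
    · rw [if_neg hx, hd1get x]
      by_cases hx1 : x ∈ (categories.map pvSegOf).take (m + 1)
      · simp [pvSpec, hx1]
      · by_cases hx2 : x ∈ categories.take m
        · have hx3 : x ∈ categories.take (m + 1) := by
            rw [htc]; exact List.mem_append_left _ hx2
          simp [pvSpec, hx1, hx2, hx3]
        · have hx3 : x ∉ categories.take (m + 1) := by
            rw [htc]
            intro hmem
            rcases List.mem_append.mp hmem with h | h
            · exact hx2 h
            · simp at h; exact hx h
          simp [pvSpec, hx1, hx2, hx3]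

-- folding B's loop over the remaining suffix
theorem pv_fold_inv (categories : List String) :
    ∀ (l : List String) (m : Nat) (d : PySem.Dict String Int),
      categories.drop m = l → pvInv categories m d →
      pvInv categories (m + l.length)
        (List.foldl (pvRankStep (categories.length : Int)) d (PySem.List.enumerate l (m : Int))) := by
  intro l
  induction l with
  | nil =>
    intro m d _ hinv
    simpa [PySem.List.enumerate_nil] using hinv
  | cons c rest ih =>
    intro m d hdrop hinv
    have hm : m < categories.length := by
      by_contra hge
      rw [List.drop_eq_nil_of_le (by omega)] at hdrop
      simp at hdrop
    have hcons : categories.drop m = categories[m] :: categories.drop (m + 1) :=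
      List.drop_eq_getElem_cons hm
    rw [hdrop] at hcons
    have hc : categories[m] = c := (List.cons.injEq _ _ _ _ ▸ hcons.symm).1
    have hrest : categories.drop (m + 1) = rest := (List.cons.injEq _ _ _ _ ▸ hcons.symm).2
    rw [PySem.List.enumerate_cons, List.foldl_cons]
    have hstep := pv_inv_step categories m d hm hinv
    rw [hc] at hstep
    have hcast : (m : Int) + 1 = ((m + 1 : Nat) : Int) := by push_cast; ring
    rw [hcast]
    have := ih (m + 1) _ hrest hstep
    have harith : m + 1 + rest.length = m + (c :: rest).length := by simp; omega
    rw [harith] at this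
    exact this

-- dedup of a cons: head, then the dedup of the tail without the head
theorem pv_dedup_cons (y : String) (ys : List String) :
    PySem.List.dedup (y :: ys) = y :: (PySem.List.dedup ys).filter (fun z => !(z == y)) := by
  have h1 : (y :: ys) = [y] ++ ys := rfl
  rw [PySem.List.dedup_eq_ofList, PySem.List.dedup_eq_ofList, h1, PySem.Set.ofList_append,
    PySem.Set.update_eq_append_filter]
  have h2 : PySem.Set.ofList [y] = [y] := rfl
  rw [h2]
  simp [PySem.Set.contains]
  congr 1

-- dedup lists first occurrences in increasing index order
theorem pv_dedup_pairwise (ys : List String) :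
    (PySem.List.dedup ys).Pairwise (fun a b => ys.idxOf a < ys.idxOf b) := by
  induction ys with
  | nil => simp [PySem.List.dedup]
  | cons y ys ih =>
    rw [pv_dedup_cons]
    refine List.pairwise_cons.mpr ⟨?_, ?_⟩
    · intro b hb
      obtain ⟨hbmem, hbne⟩ := List.mem_filter.mp hb
      have hbne' : b ≠ y := by simpa using hbne
      rw [List.idxOf_cons_self, List.idxOf_cons_ne _ (Ne.symm hbne')]
      omega
    · refine ((ih.filter _).imp_of_mem ?_)
      intro a b ha hb hr
      have hane : a ≠ y := by simpa using (List.mem_filter.mp ha).2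
      have hbne : b ≠ y := by simpa using (List.mem_filter.mp hb).2
      rw [List.idxOf_cons_ne _ (Ne.symm hane), List.idxOf_cons_ne _ (Ne.symm hbne)]
      omega

-- the rank dict's keys, sorted by rank, are exactly dedup(segments ++ categories)
theorem pv_sorted_rank (categories : List String) :
    PySem.List.sorted
      (PySem.Dict.keys ((PySem.List.enumerate categories).foldl
        (pvRankStep (categories.length : Int)) PySem.Dict.empty))
      (fun k => PySem.Dict.getD ((PySem.List.enumerate categories).foldl
        (pvRankStep (categories.length : Int)) PySem.Dict.empty) k 0) =
    PySem.List.dedup (categories.map pvSegOf ++ categories) := by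
  have hinv := pv_fold_inv categories categories 0 PySem.Dict.empty (by simp) (pv_inv_zero categories)
  simp only [Nat.cast_zero, Nat.zero_add] at hinv
  set D := (PySem.List.enumerate categories).foldl
    (pvRankStep (categories.length : Int)) PySem.Dict.empty with hD
  obtain ⟨hnd, hget⟩ := hinv
  have hlenseg : (categories.map pvSegOf).length = categories.length := by simp
  have htakeseg : (categories.map pvSegOf).take categories.length = categories.map pvSegOf := by
    rw [← hlenseg, List.take_length]
  have hspec : ∀ x, pvSpec categories categories.length x =
      (if x ∈ categories.map pvSegOf then some (((categories.map pvSegOf).idxOf x : Int))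
       else if x ∈ categories then some ((categories.length : Int) + (categories.idxOf x : Int))
       else none) := by
    intro x
    simp [pvSpec, htakeseg, List.take_length]
  have hkeys : ∀ x, x ∈ D.keys ↔ x ∈ categories.map pvSegOf ++ categories := by
    intro x
    constructor
    · intro hx
      by_contra hnot
      rw [List.mem_append] at hnot
      push Not at hnot
      have := hget x
      rw [hspec x, if_neg hnot.1, if_neg hnot.2] at this
      exact ((PySem.Dict.get?_eq_none_iff_not_mem_keys D x).mp this) hx
    · intro hx
      by_contra hnot
      have hnone := (PySem.Dict.get?_eq_none_iff_not_mem_keys D x).mpr hnot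
      rw [hget x, hspec x] at hnone
      rcases List.mem_append.mp hx with h | h
      · rw [if_pos h] at hnone; simp at hnone
      · by_cases h1 : x ∈ categories.map pvSegOf
        · rw [if_pos h1] at hnone; simp at hnone
        · rw [if_neg h1, if_pos h] at hnone; simp at hnone
  have hnodupL : (PySem.List.dedup (categories.map pvSegOf ++ categories)).Nodup :=
    PySem.List.nodup_dedup _
  have hperm : (PySem.List.dedup (categories.map pvSegOf ++ categories)).Perm D.keys := by
    rw [List.perm_ext_iff_of_nodup hnodupL hnd]
    intro a
    rw [PySem.List.mem_dedup, hkeys a]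
  have hkey : ∀ x ∈ PySem.List.dedup (categories.map pvSegOf ++ categories),
      PySem.Dict.getD D x 0 = (((categories.map pvSegOf ++ categories).idxOf x : Nat) : Int) := by
    intro x hx
    rw [PySem.List.mem_dedup] at hx
    rw [PySem.Dict.getD_eq_get?_getD, hget x, hspec x]
    by_cases hxs : x ∈ categories.map pvSegOf
    · rw [if_pos hxs, List.idxOf_append_of_mem hxs]
      rfl
    · have hxc : x ∈ categories := by
        rcases List.mem_append.mp hx with h | h
        · exact absurd h hxs
        · exact h
      rw [if_neg hxs, if_pos hxc, List.idxOf_append_of_notMem hxs, hlenseg]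
      push_cast
      rfl
  have hpair : (PySem.List.dedup (categories.map pvSegOf ++ categories)).Pairwise
      (fun a b => PySem.Dict.getD D a 0 < PySem.Dict.getD D b 0) := by
    refine (pv_dedup_pairwise (categories.map pvSegOf ++ categories)).imp_of_mem ?_
    intro a b ha hb hr
    rw [hkey a ha, hkey b hb]
    exact_mod_cast hr
  exact PySem.List.sorted_eq_of_perm_of_pairwise_lt _ _ _ hperm hpair

-- ===== VERDICT (by name: the statement is the Claim_ definition above) =====
theorem fallback_categories_py_spec : Claim_equal_fallback_categories_py := by
  intro categories top_k _
  unfold Spec_fallback_categories_py fallback_categories_py_alt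
  by_cases h0 : top_k ≤ 0
  · unfold fallback_categories_py
    simp [h0]
  · simp only [h0, if_false]
    rw [pv_A_char categories top_k (by omega)]
    rw [PySem.List.slice_to _ (by omega : (0:Int) ≤ top_k)]
    rw [pv_sorted_rank categories]
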